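-- pv_equiv track=rewrite | github.com/GvandeSteeg/adventofcode | 2018/day2/day2.py | assignment1
-- ===== SOURCE A (Python) =====
-- from collections import Counter
--
-- def count_twos_and_threes(input_string):
--     count = Counter(input_string).values()
--     return any(i == 2 for i in count), any(i == 3 for i in count)
--
-- def assignment1(*input_list):
--     twos = 0
--     threes = 0
--     for i in input_list:
--         two, three = count_twos_and_threes(i)
--         twos += 1 if two else 0
--         threes += 1 if three else 0
--
--     return twos * threes
-- ===== SOURCE B (Python) =====
-- def count_twos_and_threes(input_string):
--     # sort the characters, then scan consecutive equal-character runs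
--     chars = sorted(input_string)
--     has2 = False
--     has3 = False
--     while chars:
--         c = chars[0]
--         run = 1
--         while run < len(chars) and chars[run] == c:
--             run += 1
--         if run == 2:
--             has2 = True
--         elif run == 3:
--             has3 = True
--         chars = chars[run:]
--     return has2, has3
--
--
-- def assignment1(*input_list):
--     results = [count_twos_and_threes(s) for s in input_list]
--     twos = sum(1 for two, _ in results if two)
--     threes = sum(1 for _, three in results if three)
--     return twos * threes
-- ===== Notes on version B (the rewrite author's own statement) =====
-- stated objective: alternative
-- what changed: Replaces the Counter hash-count helper by sorting each string and scanning consecutive equal-character runs, and replaces the accumulating outer loop by mapping the helper over the list and summing the two flag columns.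
import Mathlib
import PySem

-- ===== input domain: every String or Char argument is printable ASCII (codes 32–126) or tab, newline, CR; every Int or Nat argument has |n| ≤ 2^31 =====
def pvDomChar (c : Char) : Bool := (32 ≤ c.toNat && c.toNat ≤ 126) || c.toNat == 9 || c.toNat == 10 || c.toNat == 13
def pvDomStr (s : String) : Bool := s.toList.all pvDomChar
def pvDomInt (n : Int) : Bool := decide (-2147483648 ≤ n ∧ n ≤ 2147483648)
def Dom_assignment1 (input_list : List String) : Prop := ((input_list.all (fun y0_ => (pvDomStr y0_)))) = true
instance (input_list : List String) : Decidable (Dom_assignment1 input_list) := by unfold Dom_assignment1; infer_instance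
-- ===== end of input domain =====

-- B replaces the Counter-based helper by sorting the iterable and scanning consecutive
-- equal-element runs, and sums the flag columns of a mapped list instead of an
-- accumulating loop (objective: alternative, same result).
-- NOTE on *input_list: called with one list argument, A's varargs tuple is the 1-tuple
-- (input_list,), so A's for-loop runs once over that tuple and the Counter counts the
-- list's STRING elements; both ports transcribe exactly that.

-- ===== PORT A =====
def count_twos_and_threes (input_string : List String) : Bool × Bool :=
  let count := (PySem.Dict.counter input_string).values
  (count.any (fun i => i == (2 : Int)), count.any (fun i => i == (3 : Int)))

def assignment1 (input_list : List String) : Int :=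
  let acc := [input_list].foldl (fun (acc : Int × Int) i =>
      let tt := count_twos_and_threes i
      (acc.1 + (if tt.1 then 1 else 0), acc.2 + (if tt.2 then 1 else 0))) (0, 0)
  acc.1 * acc.2

-- ===== PORT B =====
-- scan of consecutive equal-element runs over a (sorted) list
def runScan (chars : List String) (has2 has3 : Bool) : Bool × Bool :=
  match chars with
  | [] => (has2, has3)
  | c :: rest =>
    let run := 1 + (rest.takeWhile (fun x => x == c)).length
    let rest' := rest.dropWhile (fun x => x == c)
    if run = 2 then runScan rest' true has3
    else if run = 3 then runScan rest' has2 true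
    else runScan rest' has2 has3
termination_by chars.length
decreasing_by all_goals exact Nat.lt_succ_of_le (List.length_dropWhile_le _ _)

def count_twos_and_threes_alt (input_string : List String) : Bool × Bool :=
  runScan (PySem.List.sorted input_string (fun x => x) false) false false

def assignment1_alt (input_list : List String) : Int :=
  let results := [input_list].map count_twos_and_threes_alt
  let twos := ((results.filter (fun p => p.1)).map (fun _ => (1 : Int))).sum
  let threes := ((results.filter (fun p => p.2)).map (fun _ => (1 : Int))).sum
  twos * threes

-- ===== PRECONDITION & SPEC =====
def Spec_assignment1 (input_list : List String) (out : Int) : Prop := out = assignment1_alt input_list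
instance (input_list : List String) (out : Int) : Decidable (Spec_assignment1 input_list out) := by unfold Spec_assignment1; infer_instance

-- ===== CLAIM (what is proved, stated in full; the proofs are below) =====
def Claim_equal_assignment1 : Prop := ∀ (input_list : List String), Dom_assignment1 input_list → Spec_assignment1 input_list (assignment1 input_list)

-- ===== LEMMAS AND PROOFS =====

-- in a sorted list whose elements are all ≥ c, dropping the leading c-run removes every c
theorem not_mem_dropWhile_beq (c : String) (l : List String) (hpw : l.Pairwise (· ≤ ·))
    (hle : ∀ x ∈ l, c ≤ x) : c ∉ l.dropWhile (fun x => x == c) := by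
  induction l with
  | nil => simp
  | cons a l ih =>
    by_cases hac : a = c
    · rw [List.dropWhile_cons_of_pos (by simp [hac])]
      exact ih hpw.of_cons (fun x hx => hle x (List.mem_cons_of_mem a hx))
    · rw [List.dropWhile_cons_of_neg (by simp [hac])]
      intro hmem
      rcases List.mem_cons.mp hmem with h | h
      · exact hac h.symm
      · have h1 : a ≤ c := List.rel_of_pairwise_cons hpw h
        have h2 : c ≤ a := hle a List.mem_cons_self
        exact hac (le_antisymm h1 h2)

-- decomposition of a sorted cons into its head run and the sorted remainder
theorem sorted_decomp (c : String) (rest t d : List String)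
    (ht' : t = rest.takeWhile (fun x => x == c))
    (hd' : d = rest.dropWhile (fun x => x == c))
    (hl : (c :: rest).Pairwise (· ≤ ·)) :
    d.Pairwise (· ≤ ·) ∧ (c :: rest).count c = 1 + t.length ∧
    ∀ k : Nat, ((c :: rest).any (fun x => (c :: rest).count x == k))
        = (((c :: rest).count c == k) || d.any (fun x => d.count x == k)) := by
  have hsplit : t ++ d = rest := by rw [ht', hd']; exact List.takeWhile_append_dropWhile
  have ht : ∀ x ∈ t, x = c := by
    intro x hx; rw [ht'] at hx; simpa using List.mem_takeWhile_imp hx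
  have hrest : rest.Pairwise (· ≤ ·) := hl.of_cons
  have hcle : ∀ x ∈ rest, c ≤ x := fun x hx => List.rel_of_pairwise_cons hl hx
  have hdpw : d.Pairwise (· ≤ ·) := by
    rw [hd']; exact hrest.sublist (List.dropWhile_sublist _)
  have hdmem : ∀ x ∈ d, x ∈ rest := by
    intro x hx; rw [← hsplit]; exact List.mem_append.mpr (Or.inr hx)
  have hcd : c ∉ d := by rw [hd']; exact not_mem_dropWhile_beq c rest hrest hcle
  have hct : t.count c = t.length := by
    rw [List.count_eq_length]; intro b hb; simp [ht b hb]
  have hcdz : d.count c = 0 := List.count_eq_zero.mpr hcd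
  have hcount_c : (c :: rest).count c = 1 + t.length := by
    rw [← hsplit]; simp [List.count_append, hct, hcdz]; omega
  have hcount_d : ∀ x ∈ d, (c :: rest).count x = d.count x := by
    intro x hx
    have hxc : x ≠ c := fun h => hcd (h ▸ hx)
    have hxt : x ∉ t := fun h => hxc (ht x h)
    rw [← hsplit]
    simp [List.count_append, List.count_eq_zero.mpr hxt,
      (show ¬ (c = x) from fun h => hxc h.symm)]
  refine ⟨hdpw, hcount_c, ?_⟩
  intro k
  rw [Bool.eq_iff_iff]
  simp only [List.any_eq_true, Bool.or_eq_true, beq_iff_eq, List.mem_cons]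
  constructor
  · rintro ⟨x, hx | hx, hcnt⟩
    · exact Or.inl (hx ▸ hcnt)
    · rw [← hsplit] at hx
      rcases List.mem_append.mp hx with hx | hx
      · exact Or.inl ((ht x hx) ▸ hcnt)
      · exact Or.inr ⟨x, hx, by rw [← hcount_d x hx]; exact hcnt⟩
  · rintro (h | ⟨x, hx, h⟩)
    · exact ⟨c, Or.inl rfl, h⟩
    · exact ⟨x, Or.inr (hdmem x hx), by rw [hcount_d x hx]; exact h⟩

-- the run scan over a sorted list reports "some element occurs exactly 2 (resp. 3) times"
theorem runScan_sorted (l : List String) (h2 h3 : Bool) (hl : l.Pairwise (· ≤ ·)) :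
    runScan l h2 h3 =
      (h2 || l.any (fun c => l.count c == 2), h3 || l.any (fun c => l.count c == 3)) := by
  induction l, h2, h3 using runScan.induct with
  | case1 h2 h3 => simp [runScan]
  | case2 h2 h3 c rest run rest' hrun ih =>
    obtain ⟨hdpw, hcc, hany⟩ := sorted_decomp c rest _ _ rfl rfl hl
    have hc2 : (c :: rest).count c = 2 := by rw [hcc]; exact hrun
    rw [runScan]
    rw [if_pos hrun, ih hdpw]
    simp [hany 2, hany 3, hc2]
    try rfl
  | case3 h2 h3 c rest run rest' hrun hrun3 ih =>
    obtain ⟨hdpw, hcc, hany⟩ := sorted_decomp c rest _ _ rfl rfl hl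
    have hc3 : (c :: rest).count c = 3 := by rw [hcc]; exact hrun3
    rw [runScan]
    rw [if_neg hrun, if_pos hrun3, ih hdpw]
    simp [hany 2, hany 3, hc3]
    try rfl
  | case4 h2 h3 c rest run rest' hrun hrun3 ih =>
    obtain ⟨hdpw, hcc, hany⟩ := sorted_decomp c rest _ _ rfl rfl hl
    have hc2 : ¬ (c :: rest).count c = 2 := by rw [hcc]; exact hrun
    have hc3 : ¬ (c :: rest).count c = 3 := by rw [hcc]; exact hrun3
    have h2f : (List.count c rest == 1) = false := by
      simp only [beq_eq_false_iff_ne, ne_eq]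
      intro h; apply hc2; simp [h]
    have h3f : (List.count c rest == 2) = false := by
      simp only [beq_eq_false_iff_ne, ne_eq]
      intro h; apply hc3; simp [h]
    rw [runScan]
    rw [if_neg hrun, if_neg hrun3, ih hdpw]
    simp [hany 2, hany 3, h2f, h3f]
    exact ⟨rfl, rfl⟩

-- Counter values = multiset counts of the distinct elements
theorem values_counter_eq (xs : List String) :
    (PySem.Dict.counter xs).values
      = (PySem.Set.ofList xs).map (fun k => (xs.count k : Int)) := by
  rw [PySem.Dict.values_eq_map_keys _ (PySem.Dict.nodup_keys_counter xs) (0 : Int),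
    PySem.Dict.keys_counter]
  exact List.map_congr_left (fun k _ => PySem.Dict.getD_counter xs k)

-- both helpers report "some element occurs exactly twice / exactly three times"
theorem ctt_eq (s : List String) : count_twos_and_threes s = count_twos_and_threes_alt s := by
  unfold count_twos_and_threes count_twos_and_threes_alt
  have hpw : (PySem.List.sorted s (fun x => x) false).Pairwise (· ≤ ·) := by
    simpa using PySem.List.sorted_pairwise (xs := s) (key := fun x => x)
  have hperm : (PySem.List.sorted s (fun x => x) false).Perm s :=
    PySem.List.sorted_perm _ _ _
  rw [runScan_sorted _ _ _ hpw]
  have key : ∀ k : Nat, ((PySem.Dict.counter s).values.any (fun i => i == (k : Int)))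
      = (PySem.List.sorted s (fun x => x) false).any
          (fun c => (PySem.List.sorted s (fun x => x) false).count c == k) := by
    intro k
    rw [values_counter_eq, Bool.eq_iff_iff]
    rw [List.any_map]
    simp only [List.any_eq_true, Function.comp, PySem.Set.mem_ofList, beq_iff_eq,
      Nat.cast_inj, hperm.mem_iff, hperm.count_eq]
  have k2 := key 2
  have k3 := key 3
  simp only [Nat.cast_ofNat] at k2 k3
  simp [k2, k3]

theorem fold_eq (g : List String → Bool × Bool) (l : List (List String)) (a b : Int) :
    l.foldl (fun (acc : Int × Int) i =>
        let tt := g i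
        (acc.1 + (if tt.1 then 1 else 0), acc.2 + (if tt.2 then 1 else 0))) (a, b)
      = (a + (((l.map g).filter (fun p => p.1)).map (fun _ => (1 : Int))).sum,
         b + (((l.map g).filter (fun p => p.2)).map (fun _ => (1 : Int))).sum) := by
  induction l generalizing a b with
  | nil => simp
  | cons h t ih =>
    simp only [List.foldl_cons, List.map_cons, List.filter_cons, ih]
    cases hg : g h with
    | mk x y => cases x <;> cases y <;> simp <;> omega

-- ===== VERDICT (by name: the statement is the Claim_ definition above) =====
theorem assignment1_spec : Claim_equal_assignment1 := by
  intro input_list _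
  show assignment1 input_list = assignment1_alt input_list
  unfold assignment1 assignment1_alt
  rw [fold_eq count_twos_and_threes]
  rw [List.map_congr_left (fun s _ => ctt_eq s)]
  simp
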